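-- pv_equiv track=rewrite | github.com/ghalibassaidy/Latihan-Test-coding-Python- | Balon.py | select_balloons
-- ===== SOURCE A (Python) =====
-- def select_balloons(balloons: list[tuple[str, int]]) -> list[tuple[str, int]]:
--     best_ballons = {}
--
--     for color, height in balloons:
--         if color not in best_ballons:
--             best_ballons[color] = height
--
--         else:
--             if height > best_ballons[color]:
--                 best_ballons[color] = height
--
--     result = [(color, height) for color, height in best_ballons.items()]
--     return result
-- ===== SOURCE B (Python) =====
-- def select_balloons(balloons: list[tuple[str, int]]) -> list[tuple[str, int]]:
--     # Pass 1: collect the distinct colors in first-seen order (no dict at all).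
--     colors = []
--     for color, _ in balloons:
--         if color not in colors:
--             colors.append(color)
--     # Pass 2: for each color, rescan the input and take the max of its heights.
--     return [(c, max(h for cc, h in balloons if cc == c)) for c in colors]
-- ===== Notes on version B (the rewrite author's own statement) =====
-- stated objective: alternative
-- what changed: A keeps a running max per color in one dict pass; B uses no dict: it first collects the distinct colors in first-seen order as a list, then for each color rescans the input and takes the max of that color's heights.
import Mathlib
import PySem

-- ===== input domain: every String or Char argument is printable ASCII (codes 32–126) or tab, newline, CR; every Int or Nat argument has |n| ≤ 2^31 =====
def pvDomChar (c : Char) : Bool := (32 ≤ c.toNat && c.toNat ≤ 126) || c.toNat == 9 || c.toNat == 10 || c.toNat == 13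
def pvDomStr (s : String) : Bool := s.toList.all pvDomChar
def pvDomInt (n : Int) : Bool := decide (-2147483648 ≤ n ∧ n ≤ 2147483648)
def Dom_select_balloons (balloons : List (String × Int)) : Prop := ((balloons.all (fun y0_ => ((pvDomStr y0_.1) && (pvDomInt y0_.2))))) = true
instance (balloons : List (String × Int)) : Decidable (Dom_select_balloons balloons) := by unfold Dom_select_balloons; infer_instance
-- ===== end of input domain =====

-- B replaces A's single-pass running-max dict by a dict-free two-pass scheme (first-seen distinct color list, then a rescan taking each color's max); alternative decomposition, O(n*k) vs O(n).


-- ===== PORT A =====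
-- loop body of A: first-seen insert, else update when strictly larger ('best_ballons[color]' is
-- present in the else branch, so 'getD … 0' is exact there)
def pvAStep (d : PySem.Dict String Int) (p : String × Int) : PySem.Dict String Int :=
  if d.contains p.1 = false then d.insert p.1 p.2
  else if p.2 > d.getD p.1 0 then d.insert p.1 p.2
  else d

def select_balloons (balloons : List (String × Int)) : List (String × Int) :=
  -- final comprehension: [(color, height) for color, height in best_ballons.items()]
  ((balloons.foldl pvAStep PySem.Dict.empty).items).map (fun p => (p.1, p.2))

-- ===== PORT B =====
-- pass 1 of B: distinct colors in first-seen order, kept as a plain list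
def pvColors (balloons : List (String × Int)) : List String :=
  balloons.foldl (fun acc p => if p.1 ∈ acc then acc else acc ++ [p.1]) []

def select_balloons_alt (balloons : List (String × Int)) : List (String × Int) :=
  -- pass 2: max(h for cc, h in balloons if cc == c); the filtered list is nonempty for every
  -- c ∈ pvColors balloons, so the default 0 of maxD is never the result
  (pvColors balloons).map (fun c =>
    (c, PySem.List.maxD ((balloons.filter (fun q => q.1 == c)).map (·.2)) id 0))

-- ===== PRECONDITION & SPEC =====
def Spec_select_balloons (balloons : List (String × Int)) (out : List (String × Int)) : Prop := out = select_balloons_alt balloons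
instance (balloons : List (String × Int)) (out : List (String × Int)) : Decidable (Spec_select_balloons balloons out) := by unfold Spec_select_balloons; infer_instance

-- ===== CLAIM (what is proved, stated in full; the proofs are below) =====
def Claim_equal_select_balloons : Prop := ∀ (balloons : List (String × Int)), Dom_select_balloons balloons → Spec_select_balloons balloons (select_balloons balloons)

-- ===== LEMMAS AND PROOFS =====

-- max over a nonempty Int list as a plain foldl
lemma pv_maxD_cons (m : Int) (t : List Int) :
    PySem.List.maxD (m :: t) id 0 = t.foldl (fun m x => if m < x then x else m) m := by
  induction t generalizing m with
  | nil => rfl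
  | cons x t ih =>
    have key : PySem.List.maxD (m :: x :: t) id 0
        = PySem.List.maxD ((if m < x then x else m) :: t) id 0 := by
      by_cases hmx : m < x <;> simp [PySem.List.maxD, PySem.List.max?, List.foldl_cons, hmx]
    rw [key, ih, List.foldl_cons]

lemma pv_maxD_append (hs : List Int) (hne : hs ≠ []) (h : Int) :
    PySem.List.maxD (hs ++ [h]) id 0 =
      if PySem.List.maxD hs id 0 < h then h else PySem.List.maxD hs id 0 := by
  cases hs with
  | nil => exact absurd rfl hne
  | cons a t =>
    rw [List.cons_append, pv_maxD_cons, pv_maxD_cons, List.foldl_append]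
    rfl

-- membership characterisation of pvColors
lemma pv_colors_aux_mem (l : List (String × Int)) :
    ∀ (acc : List String) (c : String),
      c ∈ l.foldl (fun acc p => if p.1 ∈ acc then acc else acc ++ [p.1]) acc ↔
      c ∈ acc ∨ c ∈ l.map (·.1) := by
  induction l with
  | nil => intro acc c; simp
  | cons p t ih =>
    intro acc c
    simp only [List.foldl_cons, List.map_cons, List.mem_cons]
    by_cases hp : p.1 ∈ acc
    · rw [if_pos hp, ih]
      constructor
      · rintro (h | h)
        · exact Or.inl h
        · exact Or.inr (Or.inr h)
      · rintro (h | h | h)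
        · exact Or.inl h
        · exact Or.inl (h ▸ hp)
        · exact Or.inr h
    · rw [if_neg hp, ih]
      simp only [List.mem_append, List.mem_singleton]
      tauto

lemma pv_colors_mem (l : List (String × Int)) (c : String) :
    c ∈ pvColors l ↔ c ∈ l.map (·.1) := by
  rw [pvColors, pv_colors_aux_mem]; simp

lemma pv_colors_aux_nodup (l : List (String × Int)) :
    ∀ (acc : List String), acc.Nodup →
      (l.foldl (fun acc p => if p.1 ∈ acc then acc else acc ++ [p.1]) acc).Nodup := by
  induction l with
  | nil => intro acc h; simpa using h
  | cons p t ih =>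
    intro acc h
    simp only [List.foldl_cons]
    by_cases hp : p.1 ∈ acc
    · rw [if_pos hp]; exact ih _ h
    · rw [if_neg hp]
      refine ih _ ?_
      rw [List.nodup_append]
      refine ⟨h, List.nodup_singleton _, ?_⟩
      intro a ha b hb
      simp only [List.mem_singleton] at hb
      subst hb
      exact fun h' => hp (h' ▸ ha)

lemma pv_colors_nodup (l : List (String × Int)) : (pvColors l).Nodup :=
  pv_colors_aux_nodup l [] List.nodup_nil

lemma pv_colors_append (l : List (String × Int)) (p : String × Int) :
    pvColors (l ++ [p]) =
      if p.1 ∈ pvColors l then pvColors l else pvColors l ++ [p.1] := by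
  rw [pvColors, List.foldl_append]; rfl

-- the per-color result of B's second pass
def pvG (l : List (String × Int)) (c : String) : String × Int :=
  (c, PySem.List.maxD ((l.filter (fun q => q.1 == c)).map (·.2)) id 0)

lemma pv_filter_ne (l : List (String × Int)) (c : String) (hc : c ∉ l.map (·.1)) :
    l.filter (fun q => q.1 == c) = [] := by
  rw [List.filter_eq_nil_iff]
  intro q hq
  simp only [beq_iff_eq]
  intro hqc
  exact hc (List.mem_map.mpr ⟨q, hq, hqc⟩)

lemma pv_heights_ne_nil (l : List (String × Int)) (c : String) (hc : c ∈ pvColors l) :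
    (l.filter (fun q => q.1 == c)).map (·.2) ≠ [] := by
  rcases List.mem_map.mp ((pv_colors_mem l c).mp hc) with ⟨q, hq, hqc⟩
  have : q ∈ l.filter (fun q => q.1 == c) := List.mem_filter.mpr ⟨hq, by simp [hqc]⟩
  intro hnil
  simp only [List.map_eq_nil_iff] at hnil
  rw [hnil] at this
  exact List.not_mem_nil this

-- invariant: after processing l, A's dict items are exactly B's per-color results over l
lemma pv_fold_eq (l : List (String × Int)) :
    (l.foldl pvAStep PySem.Dict.empty).items = (pvColors l).map (pvG l) := by
  induction l using List.reverseRecOn with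
  | nil => rfl
  | append_singleton l p ih =>
    rw [List.foldl_append, List.foldl_cons, List.foldl_nil, pv_colors_append]
    set d := l.foldl pvAStep PySem.Dict.empty with hd
    have hkeys : d.keys = pvColors l := by
      have h1 : d.keys = (pvColors l).map (fun c => c) := by
        rw [PySem.Dict.keys, ih, List.map_map]; rfl
      rw [h1, List.map_id']
    have hnd : d.keys.Nodup := hkeys ▸ pv_colors_nodup l
    by_cases hc : p.1 ∈ pvColors l
    · -- known color: A updates iff strictly larger; B's group gains p.2 at the end
      rw [if_pos hc]
      have hcont : d.contains p.1 = true := by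
        rw [PySem.Dict.contains_eq_decide_mem_keys, hkeys]; simpa using hc
      have hmem : (p.1, (pvG l p.1).2) ∈ d.items := by
        rw [ih]; exact List.mem_map.mpr ⟨p.1, hc, rfl⟩
      have hgd : d.getD p.1 0 = (pvG l p.1).2 :=
        PySem.Dict.getD_of_mem_items d hmem hnd 0
      have hM : PySem.List.maxD ((l.filter (fun q => q.1 == p.1)).map (·.2)) id 0
          = d.getD p.1 0 := hgd.symm
      have hGstep : ∀ c ∈ pvColors l,
          pvG (l ++ [p]) c = if c = p.1 then
              (p.1, if (pvG l p.1).2 < p.2 then p.2 else (pvG l p.1).2)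
            else pvG l c := by
        intro c hcl
        by_cases hcp : c = p.1
        · rw [if_pos hcp, hcp]
          simp only [pvG, List.filter_append, List.map_append]
          rw [List.filter_cons, List.filter_nil]
          simp only [beq_self_eq_true, if_pos, List.map_cons, List.map_nil]
          rw [pv_maxD_append _ (pv_heights_ne_nil l p.1 (hcp ▸ hcl)) p.2]
        · rw [if_neg hcp]
          simp only [pvG, List.filter_append]
          rw [List.filter_cons, List.filter_nil]
          have : (p.1 == c) = false := by simp [Ne.symm hcp]
          simp [this]
      by_cases hgt : p.2 > d.getD p.1 0
      · have hstep : pvAStep d p = d.insert p.1 p.2 := by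
          simp [pvAStep, hcont, hgt]
        rw [hstep, PySem.Dict.items_insert_of_contains d _ hcont, ih, List.map_map]
        apply List.map_congr_left
        intro c hcl
        rw [hGstep c hcl]
        by_cases hcp : c = p.1
        · rw [if_pos hcp, hcp]
          have hlt : PySem.List.maxD ((l.filter (fun q => q.1 == p.1)).map (·.2)) id 0 < p.2 := by
            rw [hM]; exact hgt
          simp [pvG, Function.comp, hlt]
        · rw [if_neg hcp]
          simp [pvG, Function.comp, hcp]
      · have hstep : pvAStep d p = d := by
          simp [pvAStep, hcont, hgt]
        rw [hstep, ih]
        apply List.map_congr_left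
        intro c hcl
        rw [hGstep c hcl]
        by_cases hcp : c = p.1
        · rw [if_pos hcp, hcp]
          have hnlt : ¬ PySem.List.maxD ((l.filter (fun q => q.1 == p.1)).map (·.2)) id 0 < p.2 := by
            rw [hM]; exact hgt
          simp [pvG, hnlt]
        · rw [if_neg hcp]
    · -- new color: A appends (p.1, p.2); B gains p.1 at the end of the color list
      rw [if_neg hc]
      have hcont : d.contains p.1 = false := by
        rw [PySem.Dict.contains_eq_decide_mem_keys, hkeys]; simpa using hc
      have hstep : pvAStep d p = d.insert p.1 p.2 := by
        simp [pvAStep, hcont]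
      rw [hstep, PySem.Dict.items_insert_of_not_contains d _ hcont, ih, List.map_append]
      have hnl : p.1 ∉ l.map (·.1) := fun h => hc ((pv_colors_mem l p.1).mpr h)
      congr 1
      · apply List.map_congr_left
        intro c hcl
        have hcp : ¬ (p.1 == c) = true := by
          simp only [beq_iff_eq]
          intro h
          exact hc (h ▸ hcl)
        simp only [pvG, List.filter_append]
        rw [List.filter_cons, List.filter_nil]
        simp [hcp]
      · simp only [List.map_cons, List.map_nil, pvG, List.filter_append,
          pv_filter_ne l p.1 hnl]
        rw [List.filter_cons, List.filter_nil]
        simp [PySem.List.maxD, PySem.List.max?]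

-- ===== VERDICT (by name: the statement is the Claim_ definition above) =====
theorem select_balloons_spec : Claim_equal_select_balloons := by
  intro balloons _
  unfold Spec_select_balloons select_balloons select_balloons_alt
  rw [pv_fold_eq, List.map_map]
  apply List.map_congr_left
  intro c _
  rfl
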